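-- pv_equiv track=rewrite | github.com/FT1006/analytics-agent-cli | staffer/functions/excel/cells_ranges/validation_utils.py | _is_valid_cell_reference
-- ===== SOURCE A (Python) =====
-- def _is_valid_cell_reference(cell_ref: str) -> bool:
--     """Check if string is a valid cell reference like 'A1'."""
--     if not cell_ref or len(cell_ref) < 2:
--         return False
--
--     # Split into column letters and row numbers
--     col_part = []
--     row_part = []
--
--     for char in cell_ref:
--         if char.isalpha():
--             if row_part:  # Letters after numbers is invalid
--                 return False
--             col_part.append(char)
--         elif char.isdigit():
--             row_part.append(char)
--         else:
--             return False
--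
--     return len(col_part) > 0 and len(row_part) > 0
-- ===== SOURCE B (Python) =====
-- from itertools import takewhile
--
-- def _is_valid_cell_reference(cell_ref: str) -> bool:
--     """Check if string is a valid cell reference like 'A1'."""
--     prefix = ''.join(takewhile(str.isalpha, cell_ref))
--     rest = cell_ref[len(prefix):]
--     return bool(prefix) and bool(rest) and all(ch.isdigit() for ch in rest)
-- ===== Notes on version B (the rewrite author's own statement) =====
-- stated objective: simpler
-- what changed: Replaces the stateful character loop with early returns and two accumulator lists by a prefix/suffix decomposition: take the alphabetic prefix, require it and the remaining suffix to be non-empty and the suffix all digits (which subsumes the length-2 guard).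
import Mathlib
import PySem

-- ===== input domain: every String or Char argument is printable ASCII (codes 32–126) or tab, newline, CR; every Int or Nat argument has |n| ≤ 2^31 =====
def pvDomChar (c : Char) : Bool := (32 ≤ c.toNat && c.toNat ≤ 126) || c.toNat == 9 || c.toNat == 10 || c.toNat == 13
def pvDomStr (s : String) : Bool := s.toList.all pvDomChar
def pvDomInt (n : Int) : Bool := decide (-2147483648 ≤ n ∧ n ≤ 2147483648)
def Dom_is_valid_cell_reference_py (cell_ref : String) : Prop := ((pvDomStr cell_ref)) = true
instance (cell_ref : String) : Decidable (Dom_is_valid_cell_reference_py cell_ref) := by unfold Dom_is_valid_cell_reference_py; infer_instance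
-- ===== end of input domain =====

-- B replaces A's stateful loop (two accumulators + early returns) by a prefix/suffix
-- decomposition: alphabetic prefix, then both parts non-empty and the suffix all digits.

-- ===== PORT A =====
-- A's for-loop over the characters, carrying col_part and row_part; early returns become false.
def pvLoopA : List Char → List Char → List Char → Bool
  | [], col, row => decide (col.length > 0) && decide (row.length > 0)
  | c :: cs, col, row =>
    if PySem.Chars.isalpha c then
      if row ≠ [] then false else pvLoopA cs (col ++ [c]) row
    else if PySem.Chars.isdigit c then
      pvLoopA cs col (row ++ [c])
    else
      false

def is_valid_cell_reference_py (cell_ref : String) : Bool :=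
  if cell_ref.toList = [] ∨ PySem.Str.len cell_ref < 2 then false
  else pvLoopA cell_ref.toList [] []

-- ===== PORT B =====
def is_valid_cell_reference_py_alt (cell_ref : String) : Bool :=
  let cs := cell_ref.toList
  let pre := cs.takeWhile PySem.Chars.isalpha
  let rest := cs.drop pre.length
  decide (pre ≠ []) && decide (rest ≠ []) && rest.all PySem.Chars.isdigit

-- ===== PRECONDITION & SPEC =====
def Spec_is_valid_cell_reference_py (cell_ref : String) (out : Bool) : Prop := out = is_valid_cell_reference_py_alt cell_ref
instance (cell_ref : String) (out : Bool) : Decidable (Spec_is_valid_cell_reference_py cell_ref out) := by unfold Spec_is_valid_cell_reference_py; infer_instance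

-- ===== CLAIM (what is proved, stated in full; the proofs are below) =====
def Claim_equal_is_valid_cell_reference_py : Prop := ∀ (cell_ref : String), Dom_is_valid_cell_reference_py cell_ref → Spec_is_valid_cell_reference_py cell_ref (is_valid_cell_reference_py cell_ref)

-- ===== LEMMAS AND PROOFS =====

theorem pv_alpha_not_digit (c : Char) (h : PySem.Chars.isalpha c = true) :
    PySem.Chars.isdigit c = false := by
  unfold PySem.Chars.isalpha PySem.Chars.isupper PySem.Chars.islower PySem.Chars.isdigit at *
  simp at *
  intro _
  have h1 : ('9' : Char) < 'A' := by decide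
  have h2 : ('9' : Char) < 'a' := by decide
  rcases h with ⟨hA, _⟩ | ⟨hA, _⟩
  · exact lt_of_lt_of_le h1 hA
  · exact lt_of_lt_of_le h2 hA

theorem pv_drop_takeWhile (p : Char → Bool) (cs : List Char) :
    cs.drop (cs.takeWhile p).length = cs.dropWhile p := by
  induction cs with
  | nil => rfl
  | cons c cs ih =>
    by_cases h : p c = true <;> simp [List.takeWhile, List.dropWhile, h, ih]

-- once a digit has been seen (row ≠ []), A accepts iff col is non-empty and all remaining chars are digits
theorem pvLoopA_row (cs : List Char) : ∀ col row, row ≠ [] →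
    pvLoopA cs col row = (decide (col ≠ []) && cs.all PySem.Chars.isdigit) := by
  induction cs with
  | nil =>
    intro col row hr
    simp [pvLoopA, List.length_pos_iff, hr]
  | cons c cs ih =>
    intro col row hr
    by_cases ha : PySem.Chars.isalpha c = true
    · have hd : PySem.Chars.isdigit c = false := pv_alpha_not_digit c ha
      simp [pvLoopA, ha, hd, hr]
    · by_cases hd : PySem.Chars.isdigit c = true
      · simp [pvLoopA, ha, hd, ih col (row ++ [c]) (by simp)]
      · simp [pvLoopA, ha, hd]

theorem pvLoopA_start (cs : List Char) : ∀ col,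
    pvLoopA cs col [] =
      (decide (col ≠ [] ∨ cs.takeWhile PySem.Chars.isalpha ≠ []) &&
       decide (cs.dropWhile PySem.Chars.isalpha ≠ []) &&
       (cs.dropWhile PySem.Chars.isalpha).all PySem.Chars.isdigit) := by
  induction cs with
  | nil => intro col; simp [pvLoopA]
  | cons c cs ih =>
    intro col
    by_cases ha : PySem.Chars.isalpha c = true
    · simp [pvLoopA, ha, List.takeWhile, List.dropWhile, ih (col ++ [c])]
    · by_cases hd : PySem.Chars.isdigit c = true
      · simp [pvLoopA, ha, hd, List.takeWhile, List.dropWhile,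
              pvLoopA_row cs col [c] (by simp)]
      · simp [pvLoopA, ha, hd, List.takeWhile, List.dropWhile]

-- ===== VERDICT (by name: the statement is the Claim_ definition above) =====
theorem is_valid_cell_reference_py_spec : Claim_equal_is_valid_cell_reference_py := by
  intro s _
  unfold Spec_is_valid_cell_reference_py is_valid_cell_reference_py is_valid_cell_reference_py_alt
  simp only []
  rw [pv_drop_takeWhile]
  by_cases hshort : s.toList = [] ∨ PySem.Str.len s < 2
  · -- length < 2: B is false too
    simp only [hshort, if_true]
    rcases hshort with h0 | h1
    · simp [h0]
    · have : s.toList.length < 2 := by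
        have := h1; simp [PySem.Str.len, -String.length_toList] at this; omega
      match hm : s.toList, this with
      | [], _ => simp
      | [c], _ =>
        by_cases ha : PySem.Chars.isalpha c = true <;>
          simp [List.takeWhile, List.dropWhile, ha]
  · simp only [hshort, if_false]
    rw [pvLoopA_start]
    simp
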